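-- pv_equiv track=rewrite | github.com/sandhu090/bmpFileParserandEditor | bmpParserAndEditor.py | fourBitExtraction
-- ===== SOURCE A (Python) =====
-- def fourBitExtraction(pixelData, width, pallete):
--     pixels = []
--     for scanLine in pixelData:
--
--         pixelCounter = 0
--         rowOfPixels  = []
--
--         for byte in scanLine:
--             if pixelCounter >= width:
--                 break
--             palleteIdx = (byte >> 4) & 0x0F
--             rowOfPixels.append(pallete[palleteIdx])
--             pixelCounter += 1
--             if pixelCounter >= width:
--                 break
--             palleteIdx = byte & 0x0F
--             rowOfPixels.append(pallete[palleteIdx])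
--             pixelCounter += 1
--
--         pixels.append(rowOfPixels)
--     return pixels
-- ===== SOURCE B (Python) =====
-- def fourBitExtraction(pixelData, width, pallete):
--     w = max(width, 0)
--     pixels = []
--     for scanLine in pixelData:
--         nibbles = []
--         for byte in scanLine:
--             nibbles.append((byte >> 4) & 0x0F)
--             nibbles.append(byte & 0x0F)
--         pixels.append([pallete[n] for n in nibbles[:w]])
--     return pixels
-- ===== Notes on version B (the rewrite author's own statement) =====
-- stated objective: alternative
-- what changed: Replaces the interleaved extract-check-break counter loop with a two-phase pass per scanline: build the full nibble list, then slice to the (clamped) width and map it through the palette.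
import Mathlib
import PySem

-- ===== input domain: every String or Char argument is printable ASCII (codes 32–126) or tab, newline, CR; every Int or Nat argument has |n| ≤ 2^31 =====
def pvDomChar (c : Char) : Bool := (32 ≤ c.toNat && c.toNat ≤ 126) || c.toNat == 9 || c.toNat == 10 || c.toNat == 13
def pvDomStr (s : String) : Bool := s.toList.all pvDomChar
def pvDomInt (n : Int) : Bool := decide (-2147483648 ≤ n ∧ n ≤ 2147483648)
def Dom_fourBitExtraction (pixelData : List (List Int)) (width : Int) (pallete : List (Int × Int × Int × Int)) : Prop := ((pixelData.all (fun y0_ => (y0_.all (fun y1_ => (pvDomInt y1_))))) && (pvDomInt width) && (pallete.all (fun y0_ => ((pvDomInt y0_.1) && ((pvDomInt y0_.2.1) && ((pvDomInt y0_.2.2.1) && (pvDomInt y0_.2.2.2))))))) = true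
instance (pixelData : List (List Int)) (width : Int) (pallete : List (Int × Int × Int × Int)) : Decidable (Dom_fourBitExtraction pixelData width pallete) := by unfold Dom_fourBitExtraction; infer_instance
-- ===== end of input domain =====

-- B replaces A's interleaved extract-check-break counter loop with a per-scanline
-- two-phase pass (build all nibbles, then slice to the clamped width and map through
-- the palette); alternative decomposition, not claimed faster.


-- ===== PORT A =====
-- pallete[n] for n = (byte >> 4) & 0x0F or byte & 0x0F; these indices are always
-- ≥ 0, and Pre_ guarantees every accessed index is < pallete.length, so the getD
-- default is never used inside Pre_.
def pvPalGet (pallete : List (Int × Int × Int × Int)) (n : Int) : Int × Int × Int × Int :=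
  (PySem.List.pyGet? pallete n).getD (0, 0, 0, 0)

-- the inner 'for byte in scanLine' loop with its two break points; state = (pixelCounter, rowOfPixels)
def fourBitRowA (pallete : List (Int × Int × Int × Int)) (width : Int) :
    List Int → Int → List (Int × Int × Int × Int) → List (Int × Int × Int × Int)
  | [], _, acc => acc
  | b :: rest, cnt, acc =>
    if width ≤ cnt then acc
    else
      -- palleteIdx = (byte >> 4) & 0x0F  =  (byte // 16) % 16
      let acc1 := acc ++ [pvPalGet pallete (PySem.Int.mod (PySem.Int.floordiv b 16) 16)]
      if width ≤ cnt + 1 then acc1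
      else
        -- palleteIdx = byte & 0x0F  =  byte % 16
        fourBitRowA pallete width rest (cnt + 2) (acc1 ++ [pvPalGet pallete (PySem.Int.mod b 16)])

def fourBitExtraction (pixelData : List (List Int)) (width : Int) (pallete : List (Int × Int × Int × Int)) : List (List (Int × Int × Int × Int)) :=
  pixelData.map (fun scanLine => fourBitRowA pallete width scanLine 0 [])

-- ===== PORT B =====
def fourBitExtraction_alt (pixelData : List (List Int)) (width : Int) (pallete : List (Int × Int × Int × Int)) : List (List (Int × Int × Int × Int)) :=
  let w := max width 0
  pixelData.map (fun scanLine =>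
    let nibbles := scanLine.flatMap (fun b =>
      [PySem.Int.mod (PySem.Int.floordiv b 16) 16, PySem.Int.mod b 16])
    (nibbles.take w.toNat).map (pvPalGet pallete))

-- ===== PRECONDITION & SPEC =====
-- Pre_ excludes exactly the inputs on which Python A raises IndexError: some palette
-- lookup pallete[nibble] with the nibble among the first `width` nibbles of a scanline
-- is out of range (nibbles are always ≥ 0, so only the upper bound matters).
def Pre_fourBitExtraction (pixelData : List (List Int)) (width : Int) (pallete : List (Int × Int × Int × Int)) : Prop :=
  ∀ sl ∈ pixelData, ∀ i : Nat, i < sl.length →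
    ((2 * (i : Int) < width → PySem.Int.mod (PySem.Int.floordiv sl[i]! 16) 16 < pallete.length) ∧
     (2 * (i : Int) + 1 < width → PySem.Int.mod sl[i]! 16 < pallete.length))
instance (pixelData : List (List Int)) (width : Int) (pallete : List (Int × Int × Int × Int)) : Decidable (Pre_fourBitExtraction pixelData width pallete) := by unfold Pre_fourBitExtraction; infer_instance

def pvWitness_fourBitExtraction : List (List Int) × Int × (List (Int × Int × Int × Int)) :=
  ([[0x01, 0x23], [0x10]], 3, [(0, 0, 0, 255), (255, 255, 255, 255), (10, 20, 30, 40), (1, 2, 3, 4)])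

def Spec_fourBitExtraction (pixelData : List (List Int)) (width : Int) (pallete : List (Int × Int × Int × Int)) (out : List (List (Int × Int × Int × Int))) : Prop := out = fourBitExtraction_alt pixelData width pallete
instance (pixelData : List (List Int)) (width : Int) (pallete : List (Int × Int × Int × Int)) (out : List (List (Int × Int × Int × Int))) : Decidable (Spec_fourBitExtraction pixelData width pallete out) := by unfold Spec_fourBitExtraction; infer_instance

-- ===== CLAIM (what is proved, stated in full; the proofs are below) =====
def Claim_equal_fourBitExtraction : Prop := ∀ (pixelData : List (List Int)) (width : Int) (pallete : List (Int × Int × Int × Int)), Dom_fourBitExtraction pixelData width pallete → Pre_fourBitExtraction pixelData width pallete → Spec_fourBitExtraction pixelData width pallete (fourBitExtraction pixelData width pallete)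

-- ===== LEMMAS AND PROOFS =====

-- the nibble stream of one scanline, as B builds it
def pvNibbles (sl : List Int) : List Int :=
  sl.flatMap (fun b => [PySem.Int.mod (PySem.Int.floordiv b 16) 16, PySem.Int.mod b 16])

-- A's inner loop, started at counter `cnt`, appends exactly the palette image of the
-- first (width - cnt) nibbles of the remaining bytes.
theorem fourBitRowA_eq (pallete : List (Int × Int × Int × Int)) (width : Int) :
    ∀ (sl : List Int) (cnt : Int) (acc : List (Int × Int × Int × Int)),
      fourBitRowA pallete width sl cnt acc
        = acc ++ ((pvNibbles sl).take (width - cnt).toNat).map (pvPalGet pallete) := by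
  intro sl
  induction sl with
  | nil => intro cnt acc; simp [fourBitRowA, pvNibbles]
  | cons b rest ih =>
    intro cnt acc
    by_cases h1 : width ≤ cnt
    · have : (width - cnt).toNat = 0 := by omega
      simp [fourBitRowA, h1, this]
    · by_cases h2 : width ≤ cnt + 1
      · have : (width - cnt).toNat = 1 := by omega
        simp [fourBitRowA, h1, h2, this, pvNibbles]
      · have hwt : (width - cnt).toNat = (width - (cnt + 2)).toNat + 2 := by omega
        simp only [fourBitRowA, if_neg h1, if_neg h2, ih, pvNibbles, List.flatMap_cons]
        rw [hwt]
        simp [List.take_succ_cons, List.append_assoc]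

-- ===== VERDICT =====
theorem fourBitExtraction_spec : Claim_equal_fourBitExtraction := by
  intro pixelData width pallete _ _
  unfold Spec_fourBitExtraction fourBitExtraction fourBitExtraction_alt
  refine List.map_congr_left ?_
  intro sl _
  have h : width.toNat = (max width 0).toNat := by omega
  rw [fourBitRowA_eq, Int.sub_zero, h]
  rfl
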